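-- pv_equiv track=rewrite | github.com/Vishalvasanji/second-brain | scripts/digest.py | merge_memories
-- ===== SOURCE A (Python) =====
-- from typing import List, Dict, Any, Set
--
-- def normalize_text(text: str) -> str:
--     """Normalize text for deduplication (lowercase, strip whitespace)."""
--     return text.lower().strip()
--
-- def deduplicate_list(items: List[str]) -> List[str]:
--     """
--     Remove duplicate items from a list while preserving order.
--     Uses normalized text for comparison but keeps original formatting.
--
--     Args:
--         items: List of strings to deduplicate
--
--     Returns:
--         Deduplicated list preserving original formatting
--     """
--     seen: Set[str] = set()
--     result: List[str] = []
--
--     for item in items: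
--         normalized = normalize_text(item)
--         if normalized and normalized not in seen:
--             seen.add(normalized)
--             result.append(item)
--
--     return result
--
-- def merge_memories(all_memories: List[Dict[str, Any]]) -> Dict[str, List[str]]:
--     """
--     Merge and deduplicate memories from multiple sessions.
--
--     Args:
--         all_memories: List of memory dictionaries from different sessions
--
--     Returns:
--         Merged dictionary with deduplicated lists
--     """
--     merged = {
--         "facts_preferences": [],
--         "decisions": [],
--         "action_items": [],
--         "technical_details": [],
--         "people": [],
--         "topics_projects": []
--     }
--
--     # Collect all items from each category
--     for memories in all_memories:
--         for key in merged.keys():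
--             if key in memories and isinstance(memories[key], list):
--                 merged[key].extend(memories[key])
--
--     # Deduplicate each category
--     for key in merged.keys():
--         merged[key] = deduplicate_list(merged[key])
--
--     return merged
-- ===== SOURCE B (Python) =====
-- def merge_memories(all_memories):
--     keys = ["facts_preferences", "decisions", "action_items",
--             "technical_details", "people", "topics_projects"]
--     merged = {k: [] for k in keys}
--     seen = {k: set() for k in keys}
--     for memories in all_memories:
--         for key in keys:
--             if key in memories and isinstance(memories[key], list):
--                 for item in memories[key]:
--                     normalized = item.lower().strip()
--                     if normalized and normalized not in seen[key]:
--                         seen[key].add(normalized)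
--                         merged[key].append(item)
--     return merged
-- ===== Notes on version B (the rewrite author's own statement) =====
-- stated objective: alternative
-- what changed: Replaces A's two-phase structure (extend every session's list into merged, then a separate deduplicate_list pass per category) with a single fused pass that keeps a per-category seen set and appends each item at most once as it is encountered, dropping the deduplicate_list helper and the second loop entirely.
import Mathlib
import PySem

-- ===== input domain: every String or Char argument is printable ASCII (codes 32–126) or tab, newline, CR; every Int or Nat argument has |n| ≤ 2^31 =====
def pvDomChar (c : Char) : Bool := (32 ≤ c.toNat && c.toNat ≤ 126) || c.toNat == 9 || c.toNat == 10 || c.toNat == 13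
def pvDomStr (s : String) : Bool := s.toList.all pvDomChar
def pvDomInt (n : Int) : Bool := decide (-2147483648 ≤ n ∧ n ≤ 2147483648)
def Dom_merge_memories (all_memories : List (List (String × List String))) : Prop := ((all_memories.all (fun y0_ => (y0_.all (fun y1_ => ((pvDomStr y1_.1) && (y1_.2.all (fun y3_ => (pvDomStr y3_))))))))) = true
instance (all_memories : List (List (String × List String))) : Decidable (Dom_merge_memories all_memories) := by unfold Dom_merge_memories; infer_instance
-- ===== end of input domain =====

-- B fuses A's two phases (collect-then-deduplicate) into one pass with a per-category seen set; equivalence of the return value is proved (A mutates no argument).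

-- ===== PORT A =====
-- the fixed category keys of the literal dict A builds
def pvKeys : List String := ["facts_preferences", "decisions", "action_items", "technical_details", "people", "topics_projects"]

-- 'key in memories' / 'memories[key]': first-match lookup in the association list
def pvLookup? (m : List (String × List String)) (k : String) : Option (List String) :=
  (m.find? (fun p => p.1 == k)).map (·.2)

def normalize_text (text : String) : String := PySem.Str.strip (PySem.Str.lower text)

def deduplicate_list (items : List String) : List String :=
  (items.foldl
    (fun (st : PySem.Set String × List String) item =>
      let normalized := normalize_text item
      if normalized ≠ "" ∧ normalized ∉ st.1 then (PySem.Set.add st.1 normalized, st.2 ++ [item]) else st)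
    (PySem.Set.empty, [])).2

-- 'isinstance(memories[key], list)' is always true under the declared type and is dropped
def merge_memories (all_memories : List (List (String × List String))) : List (String × List String) :=
  let merged0 : PySem.Dict String (List String) := PySem.Dict.ofList (pvKeys.map (fun k => (k, ([] : List String))))
  let merged1 := all_memories.foldl
    (fun merged memories =>
      merged.keys.foldl
        (fun merged key =>
          match pvLookup? memories key with
          | some v => merged.insert key (merged.getD key [] ++ v)
          | none => merged)
        merged)
    merged0
  (merged1.keys.foldl (fun merged key => merged.insert key (deduplicate_list (merged.getD key []))) merged1).items

-- ===== PORT B =====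
def merge_memories_alt (all_memories : List (List (String × List String))) : List (String × List String) :=
  let merged0 : PySem.Dict String (List String) := PySem.Dict.ofList (pvKeys.map (fun k => (k, ([] : List String))))
  let seen0 : PySem.Dict String (PySem.Set String) := PySem.Dict.ofList (pvKeys.map (fun k => (k, PySem.Set.empty)))
  (all_memories.foldl
    (fun (st : PySem.Dict String (List String) × PySem.Dict String (PySem.Set String)) memories =>
      pvKeys.foldl
        (fun st key =>
          match pvLookup? memories key with
          | some items =>
            items.foldl
              (fun st item =>
                let normalized := normalize_text item
                if normalized ≠ "" ∧ normalized ∉ st.2.getD key [] then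
                  (st.1.modify key [] (· ++ [item]), st.2.modify key [] (fun s => PySem.Set.add s normalized))
                else st)
              st
          | none => st)
        st)
    (merged0, seen0)).1.items

-- ===== PRECONDITION & SPEC =====
def Spec_merge_memories (all_memories : List (List (String × List String))) (out : List (String × List String)) : Prop := out = merge_memories_alt all_memories
instance (all_memories : List (List (String × List String))) (out : List (String × List String)) : Decidable (Spec_merge_memories all_memories out) := by unfold Spec_merge_memories; infer_instance

-- ===== CLAIM (what is proved, stated in full; the proofs are below) =====
def Claim_equal_merge_memories : Prop := ∀ (all_memories : List (List (String × List String))), Dom_merge_memories all_memories → Spec_merge_memories all_memories (merge_memories all_memories)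

-- ===== LEMMAS AND PROOFS =====

-- the single dedup step shared (up to state packaging) by A's deduplicate_list and B's fused loop
def pvDstep (st : PySem.Set String × List String) (item : String) : PySem.Set String × List String :=
  let normalized := normalize_text item
  if normalized ≠ "" ∧ normalized ∉ st.1 then (PySem.Set.add st.1 normalized, st.2 ++ [item]) else st

-- all items contributed to category k, in order
def pvCollect (k : String) (all : List (List (String × List String))) : List String :=
  all.flatMap (fun m => (pvLookup? m k).getD [])

-- B's state, viewed at one category key
def pvPairAt (k : String)
    (st : PySem.Dict String (List String) × PySem.Dict String (PySem.Set String)) :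
    PySem.Set String × List String :=
  (st.2.getD k [], st.1.getD k [])

lemma dedup_eq_foldl (xs : List String) :
    deduplicate_list xs = (xs.foldl pvDstep (PySem.Set.empty, [])).2 := rfl

lemma getD_mergedInit (k : String) :
    (PySem.Dict.ofList (pvKeys.map (fun k => (k, ([] : List String))))).getD k [] = [] := by
  have hm : PySem.Dict.ofList (pvKeys.map (fun k => (k, ([] : List String))))
      = (⟨[("facts_preferences",[]),("decisions",[]),("action_items",[]),("technical_details",[]),("people",[]),("topics_projects",[])]⟩ : PySem.Dict String (List String)) := by decide
  rw [hm, PySem.Dict.getD_eq_get?_getD]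
  simp [PySem.Dict.get?_mk_cons]
  split_ifs <;> rfl

lemma getD_seenInit (k : String) :
    (PySem.Dict.ofList (pvKeys.map (fun k => (k, (PySem.Set.empty : PySem.Set String))))).getD k [] = ([] : PySem.Set String) := by
  have hm : PySem.Dict.ofList (pvKeys.map (fun k => (k, (PySem.Set.empty : PySem.Set String))))
      = (⟨[("facts_preferences",[]),("decisions",[]),("action_items",[]),("technical_details",[]),("people",[]),("topics_projects",[])]⟩ : PySem.Dict String (PySem.Set String)) := by decide
  rw [hm, PySem.Dict.getD_eq_get?_getD]
  simp [PySem.Dict.get?_mk_cons]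
  split_ifs <;> rfl

lemma aInner_keys (m : List (String × List String)) :
    ∀ (L : List String) (d : PySem.Dict String (List String)), (∀ j ∈ L, j ∈ d.keys) →
    (L.foldl
      (fun merged key =>
        match pvLookup? m key with
        | some v => merged.insert key (merged.getD key [] ++ v)
        | none => merged) d).keys = d.keys := by
  intro L
  induction L with
  | nil => intro d _; rfl
  | cons key L ih =>
    intro d h
    simp only [List.foldl_cons]
    cases hl : pvLookup? m key with
    | none => exact ih d (fun j hj => h j (List.mem_cons_of_mem _ hj))
    | some v =>
      have hc : d.contains key = true :=
        (PySem.Dict.contains_iff_mem_keys d key).mpr (h key List.mem_cons_self)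
      rw [ih (d.insert key (d.getD key [] ++ v))
          (fun j hj => by
            rw [PySem.Dict.keys_insert_of_contains d _ hc]
            exact h j (List.mem_cons_of_mem _ hj)),
        PySem.Dict.keys_insert_of_contains d _ hc]

lemma aInner_getD (m : List (String × List String)) :
    ∀ (L : List String), L.Nodup → ∀ (d : PySem.Dict String (List String)) (k : String),
    (L.foldl
      (fun merged key =>
        match pvLookup? m key with
        | some v => merged.insert key (merged.getD key [] ++ v)
        | none => merged) d).getD k []
      = d.getD k [] ++ (if k ∈ L then (pvLookup? m k).getD [] else []) := by
  intro L
  induction L with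
  | nil => intro _ d k; simp
  | cons key L ih =>
    intro hnd d k
    have hndL : L.Nodup := hnd.of_cons
    simp only [List.foldl_cons]
    cases hl : pvLookup? m key with
    | none =>
      rw [ih hndL d k]
      by_cases hk : k = key
      · subst hk
        have : k ∉ L := (List.nodup_cons.mp hnd).1
        simp [this, hl]
      · simp [List.mem_cons, hk]
    | some v =>
      rw [ih hndL (d.insert key (d.getD key [] ++ v)) k]
      by_cases hk : k = key
      · subst hk
        have hnotL : k ∉ L := (List.nodup_cons.mp hnd).1
        simp [hnotL, hl]
      · simp [PySem.Dict.getD_insert, hk, List.mem_cons]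

lemma aOuter :
    ∀ (all : List (List (String × List String))) (d : PySem.Dict String (List String)),
    d.keys = pvKeys →
    (all.foldl
      (fun merged memories =>
        merged.keys.foldl
          (fun merged key =>
            match pvLookup? memories key with
            | some v => merged.insert key (merged.getD key [] ++ v)
            | none => merged) merged) d).keys = pvKeys ∧
    ∀ k : String,
    (all.foldl
      (fun merged memories =>
        merged.keys.foldl
          (fun merged key =>
            match pvLookup? memories key with
            | some v => merged.insert key (merged.getD key [] ++ v)
            | none => merged) merged) d).getD k []
      = d.getD k [] ++ (if k ∈ pvKeys then pvCollect k all else []) := by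
  intro all
  induction all with
  | nil => intro d hd; exact ⟨hd, fun k => by simp [pvCollect]⟩
  | cons m all ih =>
    intro d hd
    simp only [List.foldl_cons]
    have hmem : ∀ j ∈ d.keys, j ∈ d.keys := fun j hj => hj
    have hnd : d.keys.Nodup := by rw [hd]; decide
    have hkeys1 : (d.keys.foldl
        (fun merged key =>
          match pvLookup? m key with
          | some v => merged.insert key (merged.getD key [] ++ v)
          | none => merged) d).keys = d.keys := aInner_keys m d.keys d hmem
    obtain ⟨hk, hg⟩ := ih _ (hkeys1.trans hd)
    refine ⟨hk, fun k => ?_⟩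
    rw [hg k, aInner_getD m d.keys hnd d k, hd]
    by_cases hkm : k ∈ pvKeys
    · simp [hkm, pvCollect, List.append_assoc]
    · simp [hkm]

lemma aDedup_keys :
    ∀ (L : List String) (d : PySem.Dict String (List String)), (∀ j ∈ L, j ∈ d.keys) →
    (L.foldl (fun merged key => merged.insert key (deduplicate_list (merged.getD key []))) d).keys = d.keys := by
  intro L
  induction L with
  | nil => intro d _; rfl
  | cons key L ih =>
    intro d h
    simp only [List.foldl_cons]
    have hc : d.contains key = true :=
      (PySem.Dict.contains_iff_mem_keys d key).mpr (h key List.mem_cons_self)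
    rw [ih (d.insert key (deduplicate_list (d.getD key [])))
        (fun j hj => by
          rw [PySem.Dict.keys_insert_of_contains d _ hc]
          exact h j (List.mem_cons_of_mem _ hj)),
      PySem.Dict.keys_insert_of_contains d _ hc]

lemma aDedup_getD :
    ∀ (L : List String), L.Nodup → ∀ (d : PySem.Dict String (List String)) (k : String),
    (L.foldl (fun merged key => merged.insert key (deduplicate_list (merged.getD key []))) d).getD k []
      = if k ∈ L then deduplicate_list (d.getD k []) else d.getD k [] := by
  intro L
  induction L with
  | nil => intro _ d k; simp
  | cons key L ih =>
    intro hnd d k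
    have hndL : L.Nodup := hnd.of_cons
    simp only [List.foldl_cons]
    rw [ih hndL (d.insert key (deduplicate_list (d.getD key []))) k]
    by_cases hk : k = key
    · subst hk
      have hnotL : k ∉ L := (List.nodup_cons.mp hnd).1
      simp [hnotL]
    · simp [PySem.Dict.getD_insert, hk, List.mem_cons]

lemma A_items (d1 : PySem.Dict String (List String)) (h : d1.keys = pvKeys) :
    (d1.keys.foldl (fun merged key => merged.insert key (deduplicate_list (merged.getD key []))) d1).items
      = pvKeys.map (fun k => (k, deduplicate_list (d1.getD k []))) := by
  have hkeys : (d1.keys.foldl (fun merged key => merged.insert key (deduplicate_list (merged.getD key []))) d1).keys = d1.keys :=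
    aDedup_keys d1.keys d1 (fun j hj => hj)
  have hnd : (d1.keys.foldl (fun merged key => merged.insert key (deduplicate_list (merged.getD key []))) d1).keys.Nodup := by
    rw [hkeys, h]; decide
  rw [PySem.Dict.items_eq_map_keys _ hnd [], hkeys, h]
  apply List.map_congr_left
  intro k hk
  rw [aDedup_getD pvKeys (by decide) d1 k]
  simp [hk]

lemma A_char (all : List (List (String × List String))) :
    merge_memories all = pvKeys.map (fun k => (k, deduplicate_list (pvCollect k all))) := by
  have h0k : (PySem.Dict.ofList (pvKeys.map (fun k => (k, ([] : List String))))).keys = pvKeys := by decide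
  simp only [merge_memories]
  obtain ⟨hk1, hg1⟩ := aOuter all _ h0k
  rw [A_items _ hk1]
  apply List.map_congr_left
  intro k hk
  rw [hg1 k, getD_mergedInit]
  simp [hk]

lemma bItem_ne (j k : String) (h : k ≠ j) (xs : List String) :
    ∀ st, pvPairAt k
      (xs.foldl
        (fun st item =>
          let normalized := normalize_text item
          if normalized ≠ "" ∧ normalized ∉ st.2.getD j [] then
            (st.1.modify j [] (· ++ [item]), st.2.modify j [] (fun s => PySem.Set.add s normalized))
          else st) st) = pvPairAt k st := by
  induction xs with
  | nil => intro st; rfl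
  | cons item xs ih =>
    intro st
    simp only [List.foldl_cons]
    rw [ih]
    by_cases hc : normalize_text item ≠ "" ∧ normalize_text item ∉ st.2.getD j []
    · simp only [if_pos hc, pvPairAt]
      rw [PySem.Dict.getD_modify_of_ne _ _ _ h, PySem.Dict.getD_modify_of_ne _ _ _ h]
    · simp only [if_neg hc]

lemma bItem_self (j : String) (xs : List String) :
    ∀ st, pvPairAt j
      (xs.foldl
        (fun st item =>
          let normalized := normalize_text item
          if normalized ≠ "" ∧ normalized ∉ st.2.getD j [] then
            (st.1.modify j [] (· ++ [item]), st.2.modify j [] (fun s => PySem.Set.add s normalized))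
          else st) st) = xs.foldl pvDstep (pvPairAt j st) := by
  induction xs with
  | nil => intro st; rfl
  | cons item xs ih =>
    intro st
    have hstep : pvPairAt j
        (if normalize_text item ≠ "" ∧ normalize_text item ∉ st.2.getD j [] then
          (st.1.modify j [] (· ++ [item]), st.2.modify j [] (fun s => PySem.Set.add s (normalize_text item)))
        else st) = pvDstep (pvPairAt j st) item := by
      simp only [pvPairAt, pvDstep]
      by_cases hc : normalize_text item ≠ "" ∧ normalize_text item ∉ st.2.getD j []
      · simp only [if_pos hc]
        rw [PySem.Dict.getD_modify_self, PySem.Dict.getD_modify_self]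
      · simp only [if_neg hc]
    simp only [List.foldl_cons]
    rw [ih, hstep]

lemma bItem_keys1 (j : String) (xs : List String) :
    ∀ st, j ∈ (st.1 : PySem.Dict String (List String)).keys →
    ((xs.foldl
        (fun st item =>
          let normalized := normalize_text item
          if normalized ≠ "" ∧ normalized ∉ st.2.getD j [] then
            (st.1.modify j [] (· ++ [item]), st.2.modify j [] (fun s => PySem.Set.add s normalized))
          else st) st) : PySem.Dict String (List String) × PySem.Dict String (PySem.Set String)).1.keys = st.1.keys := by
  induction xs with
  | nil => intro st _; rfl
  | cons item xs ih =>
    intro st hst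
    simp only [List.foldl_cons]
    by_cases hc : normalize_text item ≠ "" ∧ normalize_text item ∉ st.2.getD j []
    · simp only [if_pos hc]
      have hck : st.1.contains j = true := (PySem.Dict.contains_iff_mem_keys st.1 j).mpr hst
      have hkm : (st.1.modify j [] (· ++ [item])).keys = st.1.keys := by
        rw [PySem.Dict.keys_modify, PySem.Dict.keys_insert_of_contains _ _ hck]
      rw [ih _ (by rw [hkm]; exact hst)]
      exact hkm
    · simp only [if_neg hc]
      exact ih st hst

lemma bKey_getD (m : List (String × List String)) :
    ∀ (L : List String), L.Nodup → ∀ st (k : String),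
    pvPairAt k
      (L.foldl
        (fun st key =>
          match pvLookup? m key with
          | some items =>
            items.foldl
              (fun st item =>
                let normalized := normalize_text item
                if normalized ≠ "" ∧ normalized ∉ st.2.getD key [] then
                  (st.1.modify key [] (· ++ [item]), st.2.modify key [] (fun s => PySem.Set.add s normalized))
                else st) st
          | none => st) st)
      = if k ∈ L then ((pvLookup? m k).getD []).foldl pvDstep (pvPairAt k st) else pvPairAt k st := by
  intro L
  induction L with
  | nil => intro _ st k; simp
  | cons key L ih =>
    intro hnd st k
    have hndL : L.Nodup := hnd.of_cons
    simp only [List.foldl_cons]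
    cases hl : pvLookup? m key with
    | none =>
      rw [ih hndL st k]
      by_cases hk : k = key
      · subst hk
        have hnotL : k ∉ L := (List.nodup_cons.mp hnd).1
        simp [hnotL, hl]
      · simp [List.mem_cons, hk]
    | some items =>
      by_cases hk : k = key
      · subst hk
        have hnotL : k ∉ L := (List.nodup_cons.mp hnd).1
        rw [ih hndL _ k]
        simp only [hnotL, List.mem_cons, true_or, if_pos, hl]
        rw [bItem_self]
        simp
      · rw [ih hndL _ k, bItem_ne key k hk items st]
        simp [List.mem_cons, hk]

lemma bKey_keys1 (m : List (String × List String)) :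
    ∀ (L : List String) st, (∀ j ∈ L, j ∈ (st.1 : PySem.Dict String (List String)).keys) →
    ((L.foldl
        (fun st key =>
          match pvLookup? m key with
          | some items =>
            items.foldl
              (fun st item =>
                let normalized := normalize_text item
                if normalized ≠ "" ∧ normalized ∉ st.2.getD key [] then
                  (st.1.modify key [] (· ++ [item]), st.2.modify key [] (fun s => PySem.Set.add s normalized))
                else st) st
          | none => st) st) : PySem.Dict String (List String) × PySem.Dict String (PySem.Set String)).1.keys = st.1.keys := by
  intro L
  induction L with
  | nil => intro st _; rfl
  | cons key L ih =>
    intro st h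
    simp only [List.foldl_cons]
    cases hl : pvLookup? m key with
    | none => exact ih st (fun j hj => h j (List.mem_cons_of_mem _ hj))
    | some items =>
      have hks : ((items.foldl
          (fun st item =>
            let normalized := normalize_text item
            if normalized ≠ "" ∧ normalized ∉ st.2.getD key [] then
              (st.1.modify key [] (· ++ [item]), st.2.modify key [] (fun s => PySem.Set.add s normalized))
            else st) st) : PySem.Dict String (List String) × PySem.Dict String (PySem.Set String)).1.keys = st.1.keys :=
        bItem_keys1 key items st (h key List.mem_cons_self)
      rw [ih _ (fun j hj => by rw [hks]; exact h j (List.mem_cons_of_mem _ hj))]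
      exact hks

lemma bOuter :
    ∀ (all : List (List (String × List String))) st,
    (∀ k : String, k ∈ pvKeys →
      pvPairAt k
        (all.foldl
          (fun st memories =>
            pvKeys.foldl
              (fun st key =>
                match pvLookup? memories key with
                | some items =>
                  items.foldl
                    (fun st item =>
                      let normalized := normalize_text item
                      if normalized ≠ "" ∧ normalized ∉ st.2.getD key [] then
                        (st.1.modify key [] (· ++ [item]), st.2.modify key [] (fun s => PySem.Set.add s normalized))
                      else st) st
                | none => st) st) st)
        = (pvCollect k all).foldl pvDstep (pvPairAt k st)) ∧
    (st.1.keys = pvKeys →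
      ((all.foldl
          (fun st memories =>
            pvKeys.foldl
              (fun st key =>
                match pvLookup? memories key with
                | some items =>
                  items.foldl
                    (fun st item =>
                      let normalized := normalize_text item
                      if normalized ≠ "" ∧ normalized ∉ st.2.getD key [] then
                        (st.1.modify key [] (· ++ [item]), st.2.modify key [] (fun s => PySem.Set.add s normalized))
                      else st) st
                | none => st) st) st) : PySem.Dict String (List String) × PySem.Dict String (PySem.Set String)).1.keys = pvKeys) := by
  intro all
  induction all with
  | nil =>
    intro st
    exact ⟨fun k _ => by simp [pvCollect], fun h => h⟩
  | cons m all ih =>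
    intro st
    constructor
    · intro k hk
      simp only [List.foldl_cons]
      rw [(ih _).1 k hk, bKey_getD m pvKeys (by decide) st k]
      simp only [hk, if_pos]
      rw [show pvCollect k (m :: all) = (pvLookup? m k).getD [] ++ pvCollect k all from rfl,
        List.foldl_append]
    · intro h
      simp only [List.foldl_cons]
      exact (ih _).2 (by rw [bKey_keys1 m pvKeys st (fun j hj => by rw [h]; exact hj)]; exact h)

lemma B_char (all : List (List (String × List String))) :
    merge_memories_alt all = pvKeys.map (fun k => (k, ((pvCollect k all).foldl pvDstep (PySem.Set.empty, [])).2)) := by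
  have h0k : (PySem.Dict.ofList (pvKeys.map (fun k => (k, ([] : List String))))).keys = pvKeys := by decide
  simp only [merge_memories_alt]
  obtain ⟨hpair, hkeys⟩ := bOuter all
    (PySem.Dict.ofList (pvKeys.map (fun k => (k, ([] : List String)))),
     PySem.Dict.ofList (pvKeys.map (fun k => (k, PySem.Set.empty))))
  have hkB := hkeys h0k
  rw [PySem.Dict.items_eq_map_keys _ (by rw [hkB]; decide) [], hkB]
  apply List.map_congr_left
  intro k hk
  have := hpair k hk
  have hinit : pvPairAt k
      (PySem.Dict.ofList (pvKeys.map (fun k => (k, ([] : List String)))),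
       PySem.Dict.ofList (pvKeys.map (fun k => (k, PySem.Set.empty))))
      = (PySem.Set.empty, []) := by
    simp only [pvPairAt]
    rw [getD_mergedInit, getD_seenInit]
    rfl
  rw [hinit] at this
  have h2 := congrArg Prod.snd this
  simp only [pvPairAt] at h2
  rw [h2]

-- ===== VERDICT (by name: the statement is the Claim_ definition above) =====
theorem merge_memories_spec : Claim_equal_merge_memories := by
  intro all _dom
  unfold Spec_merge_memories
  rw [A_char, B_char]
  exact List.map_congr_left (fun k _ => by rw [dedup_eq_foldl])
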